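-- pv_equiv track=rewrite | github.com/despo/issuehub.io | venv/Lib/site-packages/spacy/lang/lex_attrs.py | word_shape
-- ===== SOURCE A (Python) =====
-- def word_shape(text):
--     if len(text) >= 100:
--         return "LONG"
--     shape = []
--     last = ""
--     shape_char = ""
--     seq = 0
--     for char in text:
--         if char.isalpha():
--             if char.isupper():
--                 shape_char = "X"
--             else:
--                 shape_char = "x"
--         elif char.isdigit():
--             shape_char = "d"
--         else:
--             shape_char = char
--         if shape_char == last:
--             seq += 1
--         else:
--             seq = 0
--             last = shape_char
--         if seq < 4:
--             shape.append(shape_char)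
--     return "".join(shape)
-- ===== SOURCE B (Python) =====
-- def word_shape(text):
--     if len(text) >= 100:
--         return "LONG"
--     syms = [("X" if c.isupper() else "x") if c.isalpha() else ("d" if c.isdigit() else c) for c in text]
--     out = []
--     i = 0
--     n = len(syms)
--     while i < n:
--         j = i
--         while j < n and syms[j] == syms[i]:
--             j += 1
--         out.append(syms[i] * min(j - i, 4))
--         i = j
--     return "".join(out)
-- ===== Notes on version B (the rewrite author's own statement) =====
-- stated objective: alternative
-- what changed: B first maps every character to its shape symbol, then scans the symbol list run by run with a two-pointer loop and emits each maximal run truncated to 4 symbols, instead of A's per-character state machine that tracks the last symbol and a repeat counter while appending character by character.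
import Mathlib
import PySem

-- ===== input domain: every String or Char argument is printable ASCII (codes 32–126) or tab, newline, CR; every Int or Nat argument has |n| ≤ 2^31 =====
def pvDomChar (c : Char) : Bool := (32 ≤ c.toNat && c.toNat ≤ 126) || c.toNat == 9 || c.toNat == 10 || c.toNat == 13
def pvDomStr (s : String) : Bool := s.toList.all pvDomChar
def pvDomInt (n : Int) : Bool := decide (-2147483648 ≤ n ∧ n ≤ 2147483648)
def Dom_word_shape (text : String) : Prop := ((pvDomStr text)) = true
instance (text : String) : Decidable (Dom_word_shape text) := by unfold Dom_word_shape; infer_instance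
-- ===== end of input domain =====

-- B computes the shape by mapping each char to its class symbol and then emitting maximal runs
-- truncated to 4, instead of A's per-char last/seq state machine; objective: alternative (same O(n) cost).

-- ===== PORT A =====
-- one loop iteration of A: state = (shape, last, seq); strings modelled as List Char
def stepA (st : List (List Char) × List Char × Int) (char : Char) : List (List Char) × List Char × Int :=
  let shape := st.1
  let last := st.2.1
  let seq := st.2.2
  let shape_char : List Char :=
    if PySem.Chars.isalpha char then
      (if PySem.Chars.isupper char then ['X'] else ['x'])
    else if PySem.Chars.isdigit char then ['d']
    else [char]
  let (seq, last) := if shape_char == last then (seq + 1, last) else ((0 : Int), shape_char)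
  let shape := if seq < 4 then shape ++ [shape_char] else shape
  (shape, last, seq)

def word_shape (text : String) : String :=
  if 100 ≤ PySem.Str.len text then "LONG"
  else
    let r := text.toList.foldl stepA ([], [], 0)
    String.ofList (PySem.Chars.join [] r.1)

-- ===== PORT B =====
-- the list-comprehension classifier of Source B
def symB (c : Char) : Char :=
  if PySem.Chars.isalpha c then (if PySem.Chars.isupper c then 'X' else 'x')
  else if PySem.Chars.isdigit c then 'd'
  else c

-- Source B's two-pointer run scan: the inner `while j < n and syms[j] == syms[i]` is the span
def runsB (l : List Char) : List (Char × Nat) :=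
  match l with
  | [] => []
  | c :: rest =>
    let p := rest.span (· == c)
    (c, p.1.length + 1) :: runsB p.2
termination_by l.length
decreasing_by
  simp only [List.span_eq_takeWhile_dropWhile]
  exact Nat.lt_succ_of_le (List.length_dropWhile_le _ _)

def word_shape_alt (text : String) : String :=
  if 100 ≤ PySem.Str.len text then "LONG"
  else
    let syms := text.toList.map symB
    let pieces := (runsB syms).map (fun p => List.replicate (min p.2 4) p.1)
    String.ofList (PySem.Chars.join [] pieces)

-- ===== PRECONDITION & SPEC =====
def Spec_word_shape (text : String) (out : String) : Prop := out = word_shape_alt text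
instance (text : String) (out : String) : Decidable (Spec_word_shape text out) := by unfold Spec_word_shape; infer_instance

-- ===== CLAIM (what is proved, stated in full; the proofs are below) =====
def Claim_equal_word_shape : Prop := ∀ (text : String), Dom_word_shape text → Spec_word_shape text (word_shape text)

-- ===== LEMMAS AND PROOFS =====

-- A's output (shape list) from a given last/seq state, with empty accumulator
def outA (cs : List Char) (last : List Char) (seq : Int) : List (List Char) :=
  (cs.foldl stepA ([], last, seq)).1

-- A's shape_char is the singleton of B's symbol
lemma stepA_shape_char (c : Char) :
    (if PySem.Chars.isalpha c then
      (if PySem.Chars.isupper c then (['X'] : List Char) else ['x'])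
    else if PySem.Chars.isdigit c then ['d']
    else [c]) = [symB c] := by
  simp [symB]; split_ifs <;> rfl

lemma stepA_eq (shape : List (List Char)) (last : List Char) (seq : Int) (c : Char) :
    stepA (shape, last, seq) c =
      if ([symB c] : List Char) == last then
        (if seq + 1 < 4 then shape ++ [[symB c]] else shape, last, seq + 1)
      else
        (shape ++ [[symB c]], [symB c], 0) := by
  simp only [stepA, stepA_shape_char]
  by_cases h : ([symB c] : List Char) == last
  · have hl : last = [symB c] := ((beq_iff_eq).mp h).symm
    subst hl
    simp only [h, if_true]
  · simp only [h]; simp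

-- accumulator shift
lemma foldl_acc (cs : List Char) : ∀ (acc : List (List Char)) (last : List Char) (seq : Int),
    (cs.foldl stepA (acc, last, seq)).1 = acc ++ (cs.foldl stepA ([], last, seq)).1 := by
  induction cs with
  | nil => intro acc last seq; simp
  | cons c cs ih =>
    intro acc last seq
    simp only [List.foldl_cons, stepA_eq]
    split_ifs with h1 h2
    · rw [ih (acc ++ [[symB c]]), ih ([] ++ [[symB c]])]; simp
    · exact ih acc last (seq + 1)
    · rw [ih (acc ++ [[symB c]]), ih ([] ++ [[symB c]])]; simp

-- when the head's symbol mismatches both states, the state (last, seq) is irrelevant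
lemma outA_mismatch (cs : List Char) (l l' : List Char) (s s' : Int)
    (h : cs = [] ∨ ∃ c t, cs = c :: t ∧ ([symB c] == l) = false ∧ ([symB c] == l') = false) :
    outA cs l s = outA cs l' s' := by
  rcases h with rfl | ⟨c, t, rfl, h1, h2⟩
  · rfl
  · simp only [outA, List.foldl_cons, stepA_eq, h1, h2, Bool.false_eq_true, if_false]

-- the run lemma: from state ([k], s) the loop emits min(s+1+n,4)-(s+1) more copies of [k]
lemma outA_run (cs : List Char) : ∀ (k : Char) (s : Nat),
    outA cs [k] (s : Int) =
      List.replicate (min (s + 1 + (cs.takeWhile (fun c => symB c == k)).length) 4 - (s + 1)) [k]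
        ++ outA (cs.dropWhile (fun c => symB c == k)) [] 0 := by
  induction cs with
  | nil => intro k s; simp [outA]
  | cons c cs ih =>
    intro k s
    by_cases hk : symB c == k
    · have hk' : symB c = k := beq_iff_eq.mp hk
      have hTW : List.takeWhile (fun c => symB c == k) (c :: cs)
          = c :: List.takeWhile (fun c => symB c == k) cs := by simp [hk]
      have hDW : List.dropWhile (fun c => symB c == k) (c :: cs)
          = List.dropWhile (fun c => symB c == k) cs := by simp [hk]
      rw [hTW, hDW, List.length_cons]
      have hcast : (s : Int) + 1 = ((s + 1 : Nat) : Int) := by push_cast; ring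
      have hstep : outA (c :: cs) [k] (s : Int)
          = (if s + 1 < 4 then [[k]] else []) ++ outA cs [k] ((s + 1 : Nat) : Int) := by
        simp only [outA, List.foldl_cons, stepA_eq, hk']
        by_cases h4 : (s : Int) + 1 < 4
        · have hs4 : s + 1 < 4 := by exact_mod_cast h4
          simp only [beq_self_eq_true, if_true, if_pos h4, if_pos hs4, ← hcast]
          rw [foldl_acc]; simp
        · have hs4 : ¬ (s + 1 < 4) := fun hc => h4 (by exact_mod_cast hc)
          simp only [beq_self_eq_true, if_true, if_neg h4, if_neg hs4, ← hcast,
            List.nil_append]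
      rw [hstep, ih k (s + 1)]
      by_cases hs4 : s + 1 < 4
      · rw [if_pos hs4, ← List.append_assoc]
        congr 1
        have : ([[k]] : List (List Char)) ++ List.replicate (min (s + 1 + 1 + (List.takeWhile (fun c => symB c == k) cs).length) 4 - (s + 1 + 1)) [k]
            = List.replicate (min (s + 1 + 1 + (List.takeWhile (fun c => symB c == k) cs).length) 4 - (s + 1 + 1) + 1) [k] := by
          rw [List.replicate_succ]; rfl
        rw [this]
        congr 1
        omega
      · rw [if_neg hs4, List.nil_append]
        congr 2
        omega
    · have hk0 : (symB c == k) = false := by simpa using hk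
      have hTW : List.takeWhile (fun c => symB c == k) (c :: cs) = [] := by
        simp [hk0]
      have hDW : List.dropWhile (fun c => symB c == k) (c :: cs) = c :: cs := by
        simp [hk0]
      rw [hTW, hDW, List.length_nil]
      have h0 : min (s + 1 + 0) 4 - (s + 1) = 0 := by omega
      rw [h0, List.replicate_zero, List.nil_append]
      apply outA_mismatch
      right
      refine ⟨c, cs, rfl, ?_, rfl⟩
      simpa using hk

-- flattening helpers
lemma flatten_replicate_singleton (n : Nat) (k : Char) :
    (List.replicate n ([k] : List Char)).flatten = List.replicate n k := by
  induction n with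
  | zero => simp
  | succ n ih => simp [List.replicate_succ, ih]

-- main: A's flattened shape equals B's flattened pieces
lemma main_eq : ∀ (n : Nat) (cs : List Char), cs.length ≤ n →
    (outA cs [] 0).flatten =
      ((runsB (cs.map symB)).map (fun p => List.replicate (min p.2 4) p.1)).flatten := by
  intro n
  induction n with
  | zero =>
    intro cs h
    have : cs = [] := List.length_eq_zero_iff.mp (Nat.le_zero.mp h)
    subst this; simp [outA, runsB]
  | succ n ih =>
    intro cs h
    match cs with
    | [] => simp [outA, runsB]
    | c :: cs' =>
      have hstep : outA (c :: cs') [] 0 = [symB c] :: outA cs' [symB c] 0 := by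
        simp only [outA, List.foldl_cons, stepA_eq]
        have : (([symB c] : List Char) == []) = false := by simp
        simp only [this, Bool.false_eq_true, if_false]
        rw [foldl_acc]; simp
      rw [hstep]
      have hrun := outA_run cs' (symB c) 0
      norm_num at hrun
      rw [hrun]
      -- B side
      have hmap : (c :: cs').map symB = symB c :: cs'.map symB := rfl
      rw [hmap]
      rw [runsB]
      simp only [List.span_eq_takeWhile_dropWhile]
      rw [List.takeWhile_map, List.dropWhile_map]
      simp only [List.map_cons, List.flatten_cons, List.length_map]
      have hrest := ih (cs'.dropWhile (fun x => symB x == symB c))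
        (by
          have := List.length_dropWhile_le (fun x => symB x == symB c) cs'
          simp at h; omega)
      have hfun : (fun x => symB x == symB c) = ((· == symB c) ∘ symB) := rfl
      rw [← hfun] at *
      rw [List.flatten_append, flatten_replicate_singleton, hrest]
      rw [← List.append_assoc]
      congr 1
      have hrep : (min ((List.takeWhile (fun x => symB x == symB c) cs').length + 1) 4)
          = (min (1 + (List.takeWhile (fun x => symB x == symB c) cs').length) 4 - 1) + 1 := by
        omega
      rw [hrep, List.replicate_succ]
      rfl

lemma join_nil_flatten (l : List (List Char)) : PySem.Chars.join [] l = l.flatten := by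
  simp [PySem.Chars.join, List.intercalate]
  induction l with
  | nil => simp
  | cons a t ih => cases t <;> simp_all [List.intersperse]

-- ===== VERDICT (by name: the statement is the Claim_ definition above) =====
theorem word_shape_spec : Claim_equal_word_shape := by
  intro text _
  unfold Spec_word_shape word_shape word_shape_alt
  split
  · rfl
  · have hm := main_eq text.toList.length text.toList le_rfl
    simp only [outA] at hm
    exact congrArg String.ofList (by rw [join_nil_flatten, join_nil_flatten]; exact hm)
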